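-- pv_equiv track=rewrite | github.com/pypi-data/pypi-mirror-400 | packages/chatlas/chatlas-0.15.0.tar.gz/chatlas-0.15.0/tests/conftest.py | _filter_response_headers
-- ===== SOURCE A (Python) =====
-- def _filter_response_headers(response):
--     """Remove sensitive headers from response before recording."""
--     headers_to_remove = [
--         "openai-organization",
--         "openai-project",
--         "anthropic-organization-id",
--         "set-cookie",
--         "cf-ray",
--         "x-request-id",
--         "request-id",
--     ]
--     headers = response.get("headers", {})
--     for header in headers_to_remove:
--         # Headers can be stored as lowercase or original case
--         headers.pop(header, None)
--         headers.pop(header.title(), None)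
--         headers.pop(header.lower(), None)
--         # Also handle capitalization variations
--         headers.pop(header.replace("-", "").lower(), None)
--     return response
-- ===== SOURCE B (Python) =====
-- def _filter_response_headers(response):
--     """Remove sensitive headers from response before recording."""
--     headers_to_remove = [
--         "openai-organization",
--         "openai-project",
--         "anthropic-organization-id",
--         "set-cookie",
--         "cf-ray",
--         "x-request-id",
--         "request-id",
--     ]
--     # Precompute every key variant to strip, then scan the actual headers once.
--     removal = {
--         v
--         for h in headers_to_remove
--         for v in (h, h.title(), h.lower(), h.replace("-", "").lower())
--     }
--     headers = response.get("headers", {})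
--     for key in list(headers):
--         if key in removal:
--             del headers[key]
--     return response
-- ===== Notes on version B (the rewrite author's own statement) =====
-- stated objective: idiomatic
-- what changed: Instead of looping over the blacklist and popping four case-variants per entry, B precomputes the set of all key variants once and makes a single pass over the actual header keys, deleting each key found in the set.
import Mathlib
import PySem

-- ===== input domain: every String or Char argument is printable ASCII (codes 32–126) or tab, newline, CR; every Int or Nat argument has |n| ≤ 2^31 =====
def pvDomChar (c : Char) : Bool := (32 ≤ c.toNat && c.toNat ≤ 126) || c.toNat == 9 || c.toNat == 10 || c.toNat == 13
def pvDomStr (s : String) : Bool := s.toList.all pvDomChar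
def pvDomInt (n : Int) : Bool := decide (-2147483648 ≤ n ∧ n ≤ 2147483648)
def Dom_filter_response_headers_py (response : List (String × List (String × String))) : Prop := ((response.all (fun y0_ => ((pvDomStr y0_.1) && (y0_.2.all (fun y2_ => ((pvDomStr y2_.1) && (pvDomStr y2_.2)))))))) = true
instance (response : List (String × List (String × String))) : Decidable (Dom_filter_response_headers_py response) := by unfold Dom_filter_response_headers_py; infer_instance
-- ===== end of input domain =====

-- B precomputes the set of all sensitive-key variants once and deletes matching keys in ONE pass
-- over the actual headers (instead of popping four variants per blacklist entry); same return
-- value, and both mutate response["headers"] in place in Python (modeled here on the returned value).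

-- hand port of str.title(), exact on the ASCII domain: a letter is uppercased unless the
-- previous character was a letter, in which case it is lowercased
def pyTitleChars : List Char → Bool → List Char
  | [], _ => []
  | c :: cs, prevAlpha =>
      (if prevAlpha then PySem.Chars.lowerChar c else PySem.Chars.upperChar c)
        :: pyTitleChars cs (PySem.Chars.isalpha c)

def pyTitle (s : String) : String := String.ofList (pyTitleChars s.toList false)

def pvHeadersToRemove : List String :=
  ["openai-organization", "openai-project", "anthropic-organization-id",
   "set-cookie", "cf-ray", "x-request-id", "request-id"]

-- ===== PORT A =====
-- Python mutates response["headers"] in place; on the returned value this is: re-insert the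
-- filtered headers at the same position when the key is present, else response is unchanged.
def filter_response_headers_py (response : List (String × List (String × String))) : List (String × List (String × String)) :=
  let resp : PySem.Dict String (List (String × String)) := PySem.Dict.ofList response
  let headers : PySem.Dict String String := PySem.Dict.ofList (resp.getD "headers" [])
  let headers := pvHeadersToRemove.foldl (fun h header =>
      ((((h.erase header).erase (pyTitle header)).erase
          (PySem.Str.lower header)).erase
        (PySem.Str.lower (PySem.Str.replace header "-" "")))) headers
  if resp.contains "headers" then (resp.insert "headers" headers.items).items else resp.items

-- ===== PORT B =====
def filter_response_headers_py_alt (response : List (String × List (String × String))) : List (String × List (String × String)) :=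
  let removal : List String := PySem.Set.ofList (pvHeadersToRemove.flatMap (fun h =>
      [h, pyTitle h, PySem.Str.lower h, PySem.Str.lower (PySem.Str.replace h "-" "")]))
  let resp : PySem.Dict String (List (String × String)) := PySem.Dict.ofList response
  let headers : PySem.Dict String String := PySem.Dict.ofList (resp.getD "headers" [])
  let headers := headers.keys.foldl (fun d k => if removal.contains k then d.erase k else d) headers
  if resp.contains "headers" then (resp.insert "headers" headers.items).items else resp.items

-- ===== PRECONDITION & SPEC =====
def Spec_filter_response_headers_py (response : List (String × List (String × String))) (out : List (String × List (String × String))) : Prop := out = filter_response_headers_py_alt response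
instance (response : List (String × List (String × String))) (out : List (String × List (String × String))) : Decidable (Spec_filter_response_headers_py response out) := by unfold Spec_filter_response_headers_py; infer_instance

-- ===== CLAIM (what is proved, stated in full; the proofs are below) =====
def Claim_equal_filter_response_headers_py : Prop := ∀ (response : List (String × List (String × String))), Dom_filter_response_headers_py response → Spec_filter_response_headers_py response (filter_response_headers_py response)

-- ===== LEMMAS AND PROOFS =====

-- erase is a filter on the items list
theorem items_erase (d : PySem.Dict String String) (k : String) :
    (d.erase k).items = d.items.filter (fun p => !(p.1 == k)) := rfl

def pvVariants (h : String) : List String :=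
  [h, pyTitle h, PySem.Str.lower h, PySem.Str.lower (PySem.Str.replace h "-" "")]

-- A's loop body is four successive erases = a fold of erase over the variants list
theorem foldA_eq_foldl_flat (L : List String) (d : PySem.Dict String String) :
    L.foldl (fun h header =>
      ((((h.erase header).erase (pyTitle header)).erase
          (PySem.Str.lower header)).erase
        (PySem.Str.lower (PySem.Str.replace header "-" "")))) d
      = (L.flatMap pvVariants).foldl (fun h x => h.erase x) d := by
  induction L generalizing d with
  | nil => simp
  | cons a L ih =>
      simp only [List.flatMap_cons, List.foldl_append, List.foldl_cons, List.foldl_nil,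
        pvVariants]
      exact ih _

theorem foldl_erase_items (ks : List String) (d : PySem.Dict String String) :
    (ks.foldl (fun h x => h.erase x) d).items
      = d.items.filter (fun p => !(ks.contains p.1)) := by
  induction ks generalizing d with
  | nil => simp
  | cons k ks ih =>
      simp only [List.foldl_cons, ih, items_erase, List.filter_filter]
      apply List.filter_congr
      intro p _
      simp only [List.contains_cons]
      cases hm : decide (p.1 ∈ ks) <;> rcases eq_or_ne p.1 k with h | h <;>
        simp [h, hm]

theorem foldl_erase_if_items (c : String → Bool) (ks : List String)
    (d : PySem.Dict String String) :
    (ks.foldl (fun d k => if c k then d.erase k else d) d).items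
      = d.items.filter (fun p => !(c p.1 && ks.contains p.1)) := by
  induction ks generalizing d with
  | nil => simp
  | cons k ks ih =>
      simp only [List.foldl_cons]
      by_cases hk : c k = true
      · simp only [hk, if_true, ih, items_erase, List.filter_filter]
        apply List.filter_congr
        intro p _
        simp only [List.contains_cons]
        cases hc : c p.1 <;> cases hm : decide (p.1 ∈ ks) <;>
          rcases eq_or_ne p.1 k with h | h <;>
            simp_all
      · simp only [hk, ih]
        apply List.filter_congr
        intro p _
        simp only [List.contains_cons]
        cases hc : c p.1 <;> cases hm : decide (p.1 ∈ ks) <;>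
          rcases eq_or_ne p.1 k with h | h <;>
            simp_all

-- the two filtered header dicts have the same items
theorem headers_filter_eq (h0 : PySem.Dict String String) :
    (pvHeadersToRemove.foldl (fun h header =>
      ((((h.erase header).erase (pyTitle header)).erase
          (PySem.Str.lower header)).erase
        (PySem.Str.lower (PySem.Str.replace header "-" "")))) h0)
    = (h0.keys.foldl (fun d k =>
        if (PySem.Set.ofList (pvHeadersToRemove.flatMap pvVariants) : List String).contains k
        then d.erase k else d) h0) := by
  apply PySem.Dict.ext
  rw [foldA_eq_foldl_flat, foldl_erase_items, foldl_erase_if_items]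
  apply List.filter_congr
  intro p hp
  have hkey : h0.keys.contains p.1 = true := by
    simp only [PySem.Dict.keys, List.contains_eq_mem, decide_eq_true_eq]
    exact List.mem_map_of_mem hp
  have hset : ((PySem.Set.ofList (pvHeadersToRemove.flatMap pvVariants) : List String).contains p.1)
      = ((pvHeadersToRemove.flatMap pvVariants).contains p.1) := by
    simp [List.contains_eq_mem, PySem.Set.mem_ofList]
  rw [hkey, hset, Bool.and_true]

-- ===== VERDICT (by name: the statement is the Claim_ definition above) =====
theorem filter_response_headers_py_spec : Claim_equal_filter_response_headers_py := by
  intro response _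
  show filter_response_headers_py response = filter_response_headers_py_alt response
  simp only [filter_response_headers_py, filter_response_headers_py_alt,
    headers_filter_eq]
  rfl
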